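-- pv_equiv track=rewrite | github.com/Mike-cloud-17/Masters_Diploma_Music_Recomendation_System | preprocessing/validation/step_1.py | get_first_term
-- ===== SOURCE A (Python) =====
-- def get_first_term(x):
--     try:
--         for sep in ['|','/','\\',';']:
--             if sep in x:
--                 x = x.split(sep)[0]
--         return x.strip()
--     except:
--         return x
-- ===== SOURCE B (Python) =====
-- def get_first_term(x):
--     try:
--         idx = len(x)
--         for sep in ['|', '/', '\\', ';']:
--             i = x.find(sep)
--             if i != -1 and i < idx:
--                 idx = i
--         return x[:idx].strip()
--     except:
--         return x
-- ===== Notes on version B (the rewrite author's own statement) =====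
-- stated objective: simpler
-- what changed: B replaces A's cumulative split-and-take-prefix loop (which rebuilds the string at each separator) by a single scan that keeps the minimum find() index over the four separators and takes one slice x[:idx].strip().
import Mathlib
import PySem

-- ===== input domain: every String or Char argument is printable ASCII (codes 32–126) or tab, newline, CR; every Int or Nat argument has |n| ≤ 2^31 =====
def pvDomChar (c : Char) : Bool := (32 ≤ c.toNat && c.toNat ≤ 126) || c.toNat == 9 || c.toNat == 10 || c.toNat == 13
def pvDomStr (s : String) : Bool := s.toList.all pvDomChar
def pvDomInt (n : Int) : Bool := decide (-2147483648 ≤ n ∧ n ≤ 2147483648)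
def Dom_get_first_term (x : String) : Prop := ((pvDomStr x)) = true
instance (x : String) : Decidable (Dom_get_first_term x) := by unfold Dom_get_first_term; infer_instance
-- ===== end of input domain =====

-- B replaces A's repeated split-and-take-prefix loop by one earliest-separator-index scan and a single
-- slice (objective: simpler decomposition, same cost); on String inputs A's bare except never fires.

-- ===== PORT A =====
-- A's loop: for each separator, if it occurs, replace x by x.split(sep)[0]; finally x.strip().
-- The .getD defaults are never reached: split? is some for a nonempty sep and a split list is nonempty.
def get_first_term (x : String) : String :=
  PySem.Str.strip
    ((["|", "/", "\\", ";"] : List String).foldl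
      (fun s sep =>
        if PySem.Str.isIn sep s then
          (PySem.List.pyGet? ((PySem.Str.split? s sep).getD []) 0).getD s
        else s) x)

-- ===== PORT B =====
-- B's loop: idx = len(x); for each separator take i = x.find(sep), keep idx = min; return x[:idx].strip().
def get_first_term_alt (x : String) : String :=
  let idx := (["|", "/", "\\", ";"] : List String).foldl
    (fun idx sep =>
      let i := PySem.Str.find x sep
      if i ≠ -1 ∧ i < idx then i else idx)
    (PySem.Str.len x)
  PySem.Str.strip (PySem.Str.slice x none (some idx))

-- ===== PRECONDITION & SPEC =====
def Spec_get_first_term (x : String) (out : String) : Prop := out = get_first_term_alt x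
instance (x : String) (out : String) : Decidable (Spec_get_first_term x out) := by unfold Spec_get_first_term; infer_instance

-- ===== CLAIM (what is proved, stated in full; the proofs are below) =====
def Claim_equal_get_first_term : Prop := ∀ (x : String), Dom_get_first_term x → Spec_get_first_term x (get_first_term x)

-- ===== LEMMAS AND PROOFS =====

-- splitOn.go with an accumulator is the accumulator (reversed) in front of the go with empty accumulator
lemma pv_go_acc (sep : List Char) (fuel : Nat) (l cur : List Char) (acc : List (List Char)) :
    PySem.Chars.splitOn.go sep fuel l cur acc = acc.reverse ++ PySem.Chars.splitOn.go sep fuel l cur [] := by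
  induction fuel generalizing l cur acc with
  | zero => simp [PySem.Chars.splitOn.go]
  | succ n ih =>
    cases l with
    | nil => simp [PySem.Chars.splitOn.go]
    | cons a t =>
      rw [PySem.Chars.splitOn.go, PySem.Chars.splitOn.go]
      by_cases h : sep.isPrefixOf (a :: t) = true
      · simp only [h, if_true]
        rw [ih _ _ (cur.reverse :: acc), ih _ _ [cur.reverse]]
        simp
      · simp only [h]
        exact ih _ _ acc

-- the first piece of a single-character split is the prefix before the first occurrence
lemma pv_go_first (c : Char) (fuel : Nat) (l cur : List Char) (h : l.length ≤ fuel) :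
    (PySem.Chars.splitOn.go [c] fuel l cur []).head? = some (cur.reverse ++ l.takeWhile (· ≠ c)) := by
  induction l generalizing fuel cur with
  | nil => cases fuel <;> simp [PySem.Chars.splitOn.go]
  | cons a t ih =>
    cases fuel with
    | zero => simp at h
    | succ n =>
      rw [PySem.Chars.splitOn.go]
      by_cases hc : a = c
      · have hp : ([c].isPrefixOf (a :: t)) = true := by simp [List.isPrefixOf, hc]
        simp only [hp, if_true]
        rw [pv_go_acc]
        simp [hc]
      · have hp : ([c].isPrefixOf (a :: t)) = false := by
          simp [List.isPrefixOf]; exact fun e => hc e.symm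
        simp only [hp, Bool.false_eq_true, if_false]
        rw [ih n (a :: cur) (by simpa using h)]
        simp [hc]

lemma pv_splitOn_single_head (cs : List Char) (c : Char) :
    (PySem.Chars.splitOn cs [c]).head? = some (cs.takeWhile (· ≠ c)) := by
  rw [PySem.Chars.splitOn]
  simpa using pv_go_first c (cs.length + 1) cs [] (by omega)

-- find with a single-character needle: index of the first occurrence, -1 if absent
lemma pv_find_go_single (c : Char) (l : List Char) (k : Nat) :
    PySem.Chars.find.go [c] l k =
      if c ∈ l then ((k : Int) + (l.takeWhile (· ≠ c)).length) else -1 := by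
  induction l generalizing k with
  | nil => simp [PySem.Chars.find.go]
  | cons a t ih =>
    rw [PySem.Chars.find.go]
    by_cases hc : a = c
    · have hp : ([c].isPrefixOf (a :: t)) = true := by simp [List.isPrefixOf, hc]
      simp only [hp, if_true]
      simp [hc]
    · have hp : ([c].isPrefixOf (a :: t)) = false := by
        simp [List.isPrefixOf]; exact fun e => hc e.symm
      simp only [hp, Bool.false_eq_true, if_false]
      rw [ih (k + 1), List.takeWhile_cons_of_pos (by simp [hc])]
      by_cases hm : c ∈ t
      · rw [if_pos (List.mem_cons_of_mem a hm), if_pos hm, List.length_cons]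
        push_cast; omega
      · rw [if_neg hm, if_neg (by simp [List.mem_cons, hm]; exact fun e => absurd e.symm hc)]

lemma pv_find_single (cs : List Char) (c : Char) :
    PySem.Chars.find cs [c] =
      if c ∈ cs then ((cs.takeWhile (· ≠ c)).length : Int) else -1 := by
  rw [PySem.Chars.find]
  simpa using pv_find_go_single c cs 0

lemma pv_isIn_single (s sep : String) (c : Char) (hsep : sep.toList = [c]) :
    PySem.Str.isIn sep s = decide (c ∈ s.toList) := by
  by_cases h : c ∈ s.toList
  · simp only [h, decide_true]
    rw [PySem.Str.isIn_iff_infix, hsep]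
    exact (List.singleton_infix_iff c s.toList).mpr h
  · simp only [h, decide_false]
    by_contra hne
    have : PySem.Str.isIn sep s = true := by
      cases hb : PySem.Str.isIn sep s <;> simp_all
    rw [PySem.Str.isIn_iff_infix, hsep] at this
    exact h ((List.singleton_infix_iff c s.toList).mp this)

-- one step of A's loop, on toList: take the prefix before the first occurrence of c
lemma pv_stepA_toList (s sep : String) (c : Char) (hsep : sep.toList = [c]) :
    (if PySem.Str.isIn sep s then
        (PySem.List.pyGet? ((PySem.Str.split? s sep).getD []) 0).getD s
      else s).toList = s.toList.takeWhile (· ≠ c) := by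
  by_cases h : c ∈ s.toList
  · simp only [pv_isIn_single s sep c hsep, h, decide_true, if_true]
    have hb := PySem.Str.split?_map s sep
    rw [hsep, show PySem.Chars.split? s.toList [c] = some (PySem.Chars.splitOn s.toList [c]) by
      simp [PySem.Chars.split?]] at hb
    cases hsp : PySem.Str.split? s sep with
    | none => rw [hsp] at hb; simp at hb
    | some ls =>
      rw [hsp] at hb
      simp only [Option.map_some, Option.some.injEq] at hb
      have hhd := pv_splitOn_single_head s.toList c
      rw [← hb] at hhd
      cases ls with
      | nil => simp at hhd
      | cons p rest =>
        simp only [List.map_cons, List.head?_cons, Option.some.injEq] at hhd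
        simp [PySem.List.pyGet?, PySem.List.pyIdx?, hhd]
  · simp only [pv_isIn_single s sep c hsep, h, decide_false, Bool.false_eq_true, if_false]
    rw [List.takeWhile_eq_self_iff.mpr]
    intro a ha
    simp
    exact fun e => h (e ▸ ha)

-- one step of B's loop: keeping the smaller found index is taking a min
lemma pv_stepB (cs : List Char) (c : Char) (idx : Int)
    (_h0 : 0 ≤ idx) (hle : idx ≤ (cs.length : Int)) :
    (if (if c ∈ cs then ((cs.takeWhile (· ≠ c)).length : Int) else -1) ≠ -1 ∧
        (if c ∈ cs then ((cs.takeWhile (· ≠ c)).length : Int) else -1) < idx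
      then (if c ∈ cs then ((cs.takeWhile (· ≠ c)).length : Int) else -1) else idx)
      = min idx ((cs.takeWhile (· ≠ c)).length : Int) := by
  by_cases h : c ∈ cs
  · simp only [if_pos h]
    have h0L : (0:Int) ≤ ((cs.takeWhile (· ≠ c)).length : Int) := by positivity
    by_cases hlt : ((cs.takeWhile (· ≠ c)).length : Int) < idx
    · rw [if_pos (⟨by omega, hlt⟩ : _ ∧ _)]; omega
    · rw [if_neg (by omega)]; omega
  · simp only [if_neg h]
    rw [if_neg (by omega)]
    have hcs : cs.takeWhile (· ≠ c) = cs := by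
      rw [List.takeWhile_eq_self_iff.mpr]
      intro a ha; simp; exact fun e => h (e ▸ ha)
    rw [hcs]; omega

lemma pv_tw_tw (l : List Char) (p q : Char → Bool) :
    (l.takeWhile p).takeWhile q = l.takeWhile fun a => p a && q a := by
  induction l with
  | nil => simp
  | cons a t ih => by_cases hp : p a <;> by_cases hq : q a <;> simp [hp, hq, ih]

lemma pv_len_tw_min (l : List Char) (p q : Char → Bool) :
    min (l.takeWhile p).length (l.takeWhile q).length
      = (l.takeWhile fun a => p a && q a).length := by
  induction l with
  | nil => simp
  | cons a t ih => by_cases hp : p a <;> by_cases hq : q a <;> simp [hp, hq, ← ih]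

lemma pv_take_len_tw (l : List Char) (p : Char → Bool) :
    l.take (l.takeWhile p).length = l.takeWhile p := by
  induction l with
  | nil => simp
  | cons a t ih => by_cases hp : p a <;> simp [hp, ih]

lemma pv_len_tw_le (l : List Char) (p : Char → Bool) :
    (l.takeWhile p).length ≤ l.length :=
  (List.takeWhile_sublist p).length_le

-- ===== VERDICT (by name: the statement is the Claim_ definition above) =====
theorem get_first_term_spec : Claim_equal_get_first_term := by
  intro x _
  unfold Spec_get_first_term get_first_term get_first_term_alt
  apply String.toList_inj.mp
  rw [PySem.Str.toList_strip, PySem.Str.toList_strip]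
  apply congrArg PySem.Chars.strip
  simp only [List.foldl]
  rw [pv_stepA_toList _ ";" ';' (by decide)]
  rw [pv_stepA_toList _ "\\" '\\' (by decide)]
  rw [pv_stepA_toList _ "/" '/' (by decide)]
  rw [pv_stepA_toList _ "|" '|' (by decide)]
  rw [pv_tw_tw, pv_tw_tw, pv_tw_tw]
  rw [PySem.Str.toList_slice]
  simp only [PySem.Str.find_eq, PySem.Str.len_eq,
    show (";" : String).toList = [';'] from by decide,
    show ("\\" : String).toList = ['\\'] from by decide,
    show ("/" : String).toList = ['/'] from by decide,
    show ("|" : String).toList = ['|'] from by decide]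
  rw [pv_find_single x.toList '|', pv_find_single x.toList '/',
      pv_find_single x.toList '\\', pv_find_single x.toList ';']
  rw [pv_stepB x.toList '|' (x.toList.length : Int) (by positivity) (le_refl _)]
  rw [min_eq_right (Nat.cast_le.mpr (pv_len_tw_le x.toList _))]
  rw [pv_stepB x.toList '/' _ (by positivity) (Nat.cast_le.mpr (pv_len_tw_le x.toList _))]
  rw [← Nat.cast_min, pv_len_tw_min]
  rw [pv_stepB x.toList '\\' _ (by positivity) (Nat.cast_le.mpr (pv_len_tw_le x.toList _))]
  rw [← Nat.cast_min, pv_len_tw_min]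
  rw [pv_stepB x.toList ';' _ (by positivity) (Nat.cast_le.mpr (pv_len_tw_le x.toList _))]
  rw [← Nat.cast_min, pv_len_tw_min]
  rw [PySem.Chars.slice_eq_listSlice, PySem.List.slice_to_natCast, pv_take_len_tw]
  exact congrFun (congrArg _ (funext fun a => by simp [Bool.and_assoc])) x.toList
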